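-- pv_equiv track=rewrite | github.com/RodrigoVintem/Projeto_2 | FP2324P2.py | obtem_pedras_jogadores
-- ===== SOURCE A (Python) =====
-- def obtem_pedras_jogadores(g):
--
--     pedras_brancas = 0
--     pedras_pretas = 0
--
--     for linha in g:
--         for intersecao in linha:
--             if intersecao == 0:  #  0 represente uma pedra branca
--                 pedras_brancas += 1
--             elif intersecao == 1:  #  1 represente uma pedra preta
--                 pedras_pretas += 1
--
--     return (pedras_brancas, pedras_pretas)
-- ===== SOURCE B (Python) =====
-- def obtem_pedras_jogadores(g):
--     # Different algorithm: sort the flattened cells, then locate the boundaries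
--     # of the runs of 0s and 1s by binary search (lower bounds); the counts are
--     # differences of boundary indices.
--     flat = sorted(v for linha in g for v in linha)
--
--     def lower_bound(x):
--         lo, hi = 0, len(flat)
--         while lo < hi:
--             mid = (lo + hi) // 2
--             if flat[mid] < x:
--                 lo = mid + 1
--             else:
--                 hi = mid
--         return lo
--
--     return (lower_bound(1) - lower_bound(0), lower_bound(2) - lower_bound(1))
-- ===== Notes on version B (the rewrite author's own statement) =====
-- stated objective: alternative
-- what changed: Instead of scanning with two branch-updated counters, B sorts the flattened cells and finds the run boundaries of 0 and 1 by binary search (hand-rolled lower_bound), returning counts as differences of boundary indices.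
import Mathlib
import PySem

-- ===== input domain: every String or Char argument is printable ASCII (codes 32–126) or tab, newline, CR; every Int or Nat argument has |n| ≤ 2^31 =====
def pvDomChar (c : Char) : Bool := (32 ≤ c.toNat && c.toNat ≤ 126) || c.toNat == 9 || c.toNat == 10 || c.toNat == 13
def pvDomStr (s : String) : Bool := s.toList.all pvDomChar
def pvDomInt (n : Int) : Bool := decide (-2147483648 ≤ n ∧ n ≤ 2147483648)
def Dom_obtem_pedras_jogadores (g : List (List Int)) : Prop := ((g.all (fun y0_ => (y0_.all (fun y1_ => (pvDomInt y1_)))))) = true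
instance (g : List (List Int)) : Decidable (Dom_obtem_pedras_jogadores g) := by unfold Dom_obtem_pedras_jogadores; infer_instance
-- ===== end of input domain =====

-- B replaces the branch-updated pair of counters with sort + binary-searched run
-- boundaries (objective: alternative algorithm, not faster).

-- ===== PORT A =====
def obtem_pedras_jogadores (g : List (List Int)) : Int × Int :=
  g.foldl (fun st linha =>
    linha.foldl (fun st intersecao =>
      if intersecao == 0 then (st.1 + 1, st.2)
      else if intersecao == 1 then (st.1, st.2 + 1)
      else st) st) (0, 0)

-- ===== PORT B =====
-- Source B's hand-rolled lower_bound loop (lo, hi are nonnegative ints; Python's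
-- '(lo + hi) // 2' on nonnegatives is Nat division, exact here)
def pvLower (flat : List Int) (x : Int) (lo hi : Nat) : Nat :=
  if lo < hi then
    let mid := (lo + hi) / 2
    -- flat[mid]: mid is always in range in Source B's loop (lo ≤ mid < hi ≤ len), so getD is exact
    if flat.getD mid 0 < x then pvLower flat x (mid + 1) hi
    else pvLower flat x lo mid
  else lo
termination_by hi - lo
decreasing_by all_goals omega

-- B: sort the flattened cells, counts = differences of binary-searched lower bounds
def obtem_pedras_jogadores_alt (g : List (List Int)) : Int × Int :=
  let flat := PySem.List.sorted (g.flatMap (fun linha => linha)) (fun v => v) false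
  let lb := fun x => pvLower flat x 0 flat.length
  ((lb 1 : Int) - (lb 0 : Int), (lb 2 : Int) - (lb 1 : Int))

-- ===== PRECONDITION & SPEC =====
def Spec_obtem_pedras_jogadores (g : List (List Int)) (out : Int × Int) : Prop := out = obtem_pedras_jogadores_alt g
instance (g : List (List Int)) (out : Int × Int) : Decidable (Spec_obtem_pedras_jogadores g out) := by unfold Spec_obtem_pedras_jogadores; infer_instance

-- ===== CLAIM (what is proved, stated in full; the proofs are below) =====
def Claim_equal_obtem_pedras_jogadores : Prop := ∀ (g : List (List Int)), Dom_obtem_pedras_jogadores g → Spec_obtem_pedras_jogadores g (obtem_pedras_jogadores g)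

-- ===== LEMMAS AND PROOFS =====

-- A's inner loop over a row adds (count 0, count 1) pointwise
lemma pv_row (l : List Int) (b p : Int) :
    l.foldl (fun st intersecao =>
      if intersecao == 0 then (st.1 + 1, st.2)
      else if intersecao == 1 then (st.1, st.2 + 1)
      else st) (b, p)
    = (b + (l.count 0 : Int), p + (l.count 1 : Int)) := by
  induction l generalizing b p with
  | nil => simp
  | cons x xs ih =>
    rw [List.foldl_cons]
    by_cases h0 : x = 0
    · subst h0
      rw [if_pos (by decide), ih, List.count_cons]
      simp; omega
    · by_cases h1 : x = 1
      · subst h1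
        rw [if_neg (by decide), if_pos (by decide), ih, List.count_cons]
        simp; omega
      · rw [if_neg (by simp [h0]), if_neg (by simp [h1]), ih,
            List.count_cons, List.count_cons]
        simp [h0, h1]

-- A's whole loop counts 0s and 1s of the flattened grid
lemma pv_grid (g : List (List Int)) (b p : Int) :
    g.foldl (fun st linha =>
      linha.foldl (fun st intersecao =>
        if intersecao == 0 then (st.1 + 1, st.2)
        else if intersecao == 1 then (st.1, st.2 + 1)
        else st) st) (b, p)
    = (b + ((g.flatMap (fun l => l)).count 0 : Int),
       p + ((g.flatMap (fun l => l)).count 1 : Int)) := by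
  induction g generalizing b p with
  | nil => simp
  | cons l ls ih =>
    rw [List.foldl_cons, pv_row, ih]
    simp [List.count_append]
    constructor <;> ring

-- the binary search on a sorted list computes the number of elements < x
lemma pvLower_eq (l : List Int) (x : Int) (hs : l.Pairwise (· ≤ ·)) :
    ∀ n lo hi, hi - lo ≤ n → lo ≤ hi → hi ≤ l.length →
    (∀ i, i < lo → l.getD i 0 < x) →
    (∀ i, hi ≤ i → i < l.length → x ≤ l.getD i 0) →
    pvLower l x lo hi = l.countP (fun v => decide (v < x)) := by
  have hmono : ∀ i j (hj : j < l.length) (hij : i ≤ j), l[i]'(by omega) ≤ l[j] := by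
    intro i j hj hij
    rcases Nat.lt_or_ge i j with h | h
    · exact (List.pairwise_iff_getElem.mp hs) i j (by omega) hj h
    · have : i = j := by omega
      subst this; rfl
  intro n
  induction n with
  | zero =>
    intro lo hi hn hlh hhl hbef haft
    have : lo = hi := by omega
    subst this
    rw [pvLower, if_neg (by omega)]
    -- lo = hi: the first lo elements are < x, the rest ≥ x
    have hsplit : l = l.take lo ++ l.drop lo := (List.take_append_drop lo l).symm
    rw [hsplit, List.countP_append]
    have h1 : (l.take lo).countP (fun v => decide (v < x)) = lo := by
      have : ∀ a ∈ l.take lo, (fun v => decide (v < x)) a = true := by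
        intro a ha
        obtain ⟨i, hi, hv⟩ := List.mem_iff_getElem.mp ha
        have hilen : i < l.length := by
          have := hi; simp [List.length_take] at this; omega
        have hilo : i < lo := by
          have := hi; simp [List.length_take] at this; omega
        have : a = l[i] := by
          rw [← hv]; exact (List.getElem_take ..)
        subst this
        have := hbef i hilo
        rw [List.getD_eq_getElem l 0 hilen] at this
        simpa using this
      rw [List.countP_eq_length.mpr this, List.length_take]
      omega
    have h2 : (l.drop lo).countP (fun v => decide (v < x)) = 0 := by
      apply List.countP_eq_zero.mpr
      intro a ha
      obtain ⟨i, hi, hv⟩ := List.mem_iff_getElem.mp ha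
      have hilen : lo + i < l.length := by
        have := hi; simp [List.length_drop] at this; omega
      have : a = l[lo + i] := by
        rw [← hv]; exact (List.getElem_drop ..)
      subst this
      have := haft (lo + i) (by omega) hilen
      rw [List.getD_eq_getElem l 0 hilen] at this
      simp; omega
    omega
  | succ n ih =>
    intro lo hi hn hlh hhl hbef haft
    by_cases hlt : lo < hi
    · rw [pvLower, if_pos hlt]
      have hmid1 : lo ≤ (lo + hi) / 2 := by omega
      have hmid2 : (lo + hi) / 2 < hi := by omega
      have hmlen : (lo + hi) / 2 < l.length := by omega
      by_cases hc : l.getD ((lo + hi) / 2) 0 < x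
      · rw [if_pos hc]
        apply ih _ hi (by omega) (by omega) hhl
        · intro i hilt
          rcases Nat.lt_or_ge i lo with h | h
          · exact hbef i h
          · have hilen : i < l.length := by omega
            rw [List.getD_eq_getElem l 0 hilen]
            rw [List.getD_eq_getElem l 0 hmlen] at hc
            calc l[i] ≤ l[(lo + hi) / 2] := hmono i _ hmlen (by omega)
              _ < x := hc
        · exact haft
      · rw [if_neg hc]
        apply ih lo _ (by omega) (by omega) (by omega) hbef
        intro i hge hilen
        rw [List.getD_eq_getElem l 0 hilen]
        rw [List.getD_eq_getElem l 0 hmlen] at hc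
        calc x ≤ l[(lo + hi) / 2] := by omega
          _ ≤ l[i] := hmono _ i hilen hge
    · have : lo = hi := by omega
      subst this
      exact ih lo lo (by omega) (by omega) hhl hbef haft
-- (note: the zero case covers lo = hi directly; reuse in succ keeps the proof short)

-- counting below x+1 = counting below x plus the occurrences of x
lemma pv_countP_succ (l : List Int) (x : Int) :
    l.countP (fun v => decide (v < x + 1))
      = l.countP (fun v => decide (v < x)) + l.count x := by
  induction l with
  | nil => simp
  | cons a t ih =>
    simp only [List.countP_cons, List.count_cons, ih, beq_iff_eq]
    split_ifs <;> simp_all <;> omega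

-- ===== VERDICT =====
theorem obtem_pedras_jogadores_spec : Claim_equal_obtem_pedras_jogadores := by
  intro g _
  unfold Spec_obtem_pedras_jogadores obtem_pedras_jogadores obtem_pedras_jogadores_alt
  rw [pv_grid]
  set flat0 := g.flatMap (fun l => l) with hflat0
  set flat := PySem.List.sorted flat0 (fun v => v) false with hflat
  have hperm : flat.Perm flat0 := PySem.List.sorted_perm ..
  have hpw : flat.Pairwise (· ≤ ·) := by
    have := PySem.List.sorted_pairwise flat0 (fun v => v)
    simpa using this
  have hlb : ∀ x : Int, pvLower flat x 0 flat.length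
      = flat0.countP (fun v => decide (v < x)) := by
    intro x
    rw [pvLower_eq flat x hpw flat.length 0 flat.length (by omega) (by omega)
        (le_refl _) (by omega) (by intro i h1 h2; omega)]
    exact hperm.countP_eq _
  have hc0 := pv_countP_succ flat0 0
  have hc1 := pv_countP_succ flat0 1
  simp only [zero_add] at hc0
  simp only [show (1:Int)+1 = 2 by norm_num] at hc1
  simp only [hlb, Prod.mk.injEq]
  constructor <;> push_cast <;> omega
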